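-- pv_equiv track=rewrite | github.com/stirfrypapi/coding_challenges | problem-lists/microsoft/microsoft1.py | split_helper
-- ===== SOURCE A (Python) =====
-- def split_helper(domainName: str):
--     ans = [domainName]
--     prev_period_index = domainName.index(".", 0)
--     i = prev_period_index + 1
--     while i < len(domainName):
--         if domainName[i] == ".":
--             ans.append(domainName[prev_period_index + 1:])
--             prev_period_index = i
--         i += 1
--     return ans
-- ===== SOURCE B (Python) =====
-- def split_helper(domainName: str):
--     if '.' not in domainName:
--         raise ValueError("substring not found")
--     parts = domainName.split('.')
--     return ['.'.join(parts[i:]) for i in range(len(parts) - 1)]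
-- ===== Notes on version B (the rewrite author's own statement) =====
-- stated objective: idiomatic
-- what changed: Replaced the char-by-char index-tracking scan that slices at each later period with str.split on the period followed by rejoining each part suffix parts[i:] with a period-join, for every i before the last part.
import Mathlib
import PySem

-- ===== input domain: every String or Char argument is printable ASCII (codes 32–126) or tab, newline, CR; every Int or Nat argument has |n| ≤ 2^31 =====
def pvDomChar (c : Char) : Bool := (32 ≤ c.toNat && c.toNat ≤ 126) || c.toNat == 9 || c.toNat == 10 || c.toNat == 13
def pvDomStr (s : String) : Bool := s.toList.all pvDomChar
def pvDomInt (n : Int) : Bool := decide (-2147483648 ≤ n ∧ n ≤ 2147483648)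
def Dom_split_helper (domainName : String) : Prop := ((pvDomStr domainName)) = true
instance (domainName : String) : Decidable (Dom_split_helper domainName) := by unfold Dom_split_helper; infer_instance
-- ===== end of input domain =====

-- B replaces A's char-by-char index-tracking scan with split('.') then rejoin of the part suffixes (idiomatic; same cost).

-- ===== PORT A =====
-- A's while loop over i is a foldl over the index range with state (ans, prev_period_index), on domainName.toList
def split_helper (domainName : String) : List String :=
  ((PySem.List.pyRange (PySem.Chars.findFrom domainName.toList ['.'] 0 + 1)   -- i = domainName.index(".", 0) + 1 (index: -1 only where Python raises, outside Pre_)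
      (PySem.Str.len domainName) 1).foldl                                     -- while i < len(domainName)
    (fun (st : List (List Char) × Int) i =>
      if PySem.List.pyGetD domainName.toList i ' ' = '.' then                 -- domainName[i] == "." (i always in range)
        (st.1 ++ [PySem.List.slice domainName.toList (some (st.2 + 1)) none], i)  -- ans.append(domainName[prev+1:]); prev = i
      else st)
    ([domainName.toList], PySem.Chars.findFrom domainName.toList ['.'] 0)     -- ans = [domainName]; prev = first period
    ).1.map String.ofList

-- ===== PORT B =====
def split_helper_alt (domainName : String) : List String :=
  if PySem.Chars.isIn ['.'] domainName.toList = false then []                 -- Source B raises ValueError here (outside Pre_)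
  else
    ((PySem.List.pyRange 0 (((PySem.Chars.splitOn domainName.toList ['.']).length : Int) - 1) 1).map
        (fun i => PySem.Chars.join ['.']                                      -- ['.'.join(parts[i:]) for i in range(len(parts)-1)]
          (PySem.List.slice (PySem.Chars.splitOn domainName.toList ['.']) (some i) none))).map
      String.ofList

-- ===== PRECONDITION & SPEC =====
-- Pre_ excludes exactly the inputs containing no period character, on which A (str.index) raises ValueError (B raises there too).
def Pre_split_helper (domainName : String) : Prop := PySem.Str.isIn "." domainName = true
instance (domainName : String) : Decidable (Pre_split_helper domainName) := by unfold Pre_split_helper; infer_instance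
def pvWitness_split_helper : String := "a.b.c"

def Spec_split_helper (domainName : String) (out : List String) : Prop := out = split_helper_alt domainName
instance (domainName : String) (out : List String) : Decidable (Spec_split_helper domainName out) := by unfold Spec_split_helper; infer_instance

-- ===== CLAIM (what is proved, stated in full; the proofs are below) =====
def Claim_equal_split_helper : Prop := ∀ (domainName : String), Dom_split_helper domainName → Pre_split_helper domainName → Spec_split_helper domainName (split_helper domainName)

-- ===== LEMMAS AND PROOFS =====

-- structural version of splitOn on separator '.' (proof helper)
def sp : List Char → List Char → List (List Char)
  | [], cur => [cur.reverse]
  | c :: rest, cur => if c = '.' then cur.reverse :: sp rest [] else sp rest (c :: cur)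

theorem go_spec : ∀ (fuel : Nat) (l cur : List Char) (acc : List (List Char)),
    l.length < fuel →
    PySem.Chars.splitOn.go ['.'] fuel l cur acc = acc.reverse ++ sp l cur := by
  intro fuel
  induction fuel with
  | zero => intro l cur acc h; omega
  | succ n ih =>
    intro l cur acc h
    cases l with
    | nil => simp [PySem.Chars.splitOn.go, sp]
    | cons c rest =>
      rw [PySem.Chars.splitOn.go]
      by_cases hc : c = '.'
      · subst hc
        rw [if_pos (by simp [List.isPrefixOf])]
        rw [ih]
        · simp [sp]
        · simp at h ⊢; omega
      · have : (['.'].isPrefixOf (c :: rest)) = false := by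
          simp [List.isPrefixOf]; exact fun h => absurd h.symm hc
        rw [if_neg (by simp [this])]
        rw [ih]
        · simp [sp, hc]
        · simp at h ⊢; omega

theorem splitOn_eq_sp (s : List Char) : PySem.Chars.splitOn s ['.'] = sp s [] := by
  unfold PySem.Chars.splitOn
  rw [go_spec _ _ _ _ (by omega)]
  simp

theorem sp_no_dot_append (u : List Char) : ∀ (l cur : List Char), '.' ∉ u →
    sp (u ++ l) cur = sp l (u.reverse ++ cur) := by
  induction u with
  | nil => simp
  | cons c rest ih =>
    intro l cur h
    simp only [List.mem_cons, not_or] at h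
    have hc : c ≠ '.' := fun h' => h.1 h'.symm
    simp [sp, hc, ih l (c :: cur) h.2]

theorem sp_cons : ∀ (l cur : List Char), ∃ h t, sp l cur = h :: t := by
  intro l
  induction l with
  | nil => intro cur; exact ⟨cur.reverse, [], rfl⟩
  | cons c rest ih =>
    intro cur
    by_cases hc : c = '.'
    · exact ⟨cur.reverse, sp rest [], by simp [sp, hc]⟩
    · obtain ⟨h, t, ht⟩ := ih (c :: cur); exact ⟨h, t, by simp [sp, hc, ht]⟩

theorem join_sp : ∀ (l cur : List Char), PySem.Chars.join ['.'] (sp l cur) = cur.reverse ++ l := by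
  intro l
  induction l with
  | nil => intro cur; simp [sp, PySem.Chars.join_singleton]
  | cons c rest ih =>
    intro cur
    by_cases hc : c = '.'
    · subst hc
      obtain ⟨h, t, ht⟩ := sp_cons rest []
      rw [show sp ('.' :: rest) cur = cur.reverse :: sp rest [] from by simp [sp]]
      rw [ht, PySem.Chars.join_cons_cons, ← ht, ih]
      simp
    · simp only [sp, if_neg hc]
      rw [ih]
      simp

-- suffixes appended by A's loop: w = suffix after the last seen period, scan = chars not yet scanned
def dotSufs : List Char → List Char → List (List Char)
  | _, [] => []
  | w, c :: rest => if c = '.' then w :: dotSufs rest rest else dotSufs w rest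

theorem dotSufs_no_dot (scan : List Char) : ∀ (w : List Char), '.' ∉ scan → dotSufs w scan = [] := by
  induction scan with
  | nil => intro w _; rfl
  | cons c rest ih =>
    intro w h
    simp only [List.mem_cons, not_or] at h
    have hc : c ≠ '.' := fun h' => h.1 h'.symm
    simp [dotSufs, hc, ih w h.2]

theorem dotSufs_skip (a : List Char) : ∀ (w scan : List Char), '.' ∉ a →
    dotSufs w (a ++ scan) = dotSufs w scan := by
  induction a with
  | nil => simp
  | cons c rest ih =>
    intro w scan h
    simp only [List.mem_cons, not_or] at h
    have hc : c ≠ '.' := fun h' => h.1 h'.symm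
    simp [dotSufs, hc, ih w scan h.2]

-- the body of B's comprehension as a function of the parts list
def brange (parts : List (List Char)) : List (List Char) :=
  (PySem.List.pyRange 0 ((parts.length : Int) - 1) 1).map
    (fun i => PySem.Chars.join ['.'] (PySem.List.slice parts (some i) none))

theorem brange_cons (a : List Char) (pb : List (List Char)) (h : pb ≠ []) :
    brange (a :: pb) = PySem.Chars.join ['.'] (a :: pb) :: brange pb := by
  have hlen : 0 < pb.length := List.length_pos_iff.mpr h
  unfold brange
  have h1 : (((a :: pb).length : Int)) - 1 = (pb.length : Int) := by simp
  rw [h1, PySem.List.pyRange_one_cons (by exact_mod_cast hlen)]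
  simp only [List.map_cons]
  congr 1
  · simp
  · rw [PySem.List.pyRange_one, PySem.List.pyRange_one]
    simp only [List.map_map, sub_zero]
    apply List.map_congr_left
    intro k hk
    simp only [Function.comp_apply]
    have h2 : (0 : Int) + 1 + (k : Int) = ((k + 1 : Nat) : Int) := by omega
    have h3 : (0 : Int) + (k : Int) = ((k : Nat) : Int) := by omega
    rw [h2, h3, PySem.List.slice_from_natCast, PySem.List.slice_from_natCast]
    simp

-- A's loop invariant: scanning the tail w of cs (current index = u.length, last period at q)
-- appends exactly dotSufs (cs.drop (q+1)) w to ans.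
theorem loopA : ∀ (w cs u : List Char) (ans : List (List Char)) (q : Nat),
    cs = u ++ w → q + 1 ≤ u.length →
    ((PySem.List.pyRange (u.length : Int) (cs.length : Int) 1).foldl
      (fun (st : List (List Char) × Int) i =>
        if PySem.List.pyGetD cs i ' ' = '.' then
          (st.1 ++ [PySem.List.slice cs (some (st.2 + 1)) none], i)
        else st) (ans, (q : Int))).1
    = ans ++ dotSufs (cs.drop (q + 1)) w := by
  intro w
  induction w with
  | nil =>
    intro cs u ans q hcs hq
    have hle : (cs.length : Int) ≤ (u.length : Int) := by rw [hcs]; simp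
    rw [PySem.List.pyRange_one_eq_nil hle]
    simp [dotSufs]
  | cons c rest ih =>
    intro cs u ans q hcs hq
    have hlt : (u.length : Int) < (cs.length : Int) := by
      have hlen : cs.length = u.length + (rest.length + 1) := by rw [hcs]; simp
      omega
    rw [PySem.List.pyRange_one_cons hlt]
    simp only [List.foldl_cons]
    have hget : PySem.List.pyGetD cs (u.length : Int) ' ' = c := by
      rw [PySem.List.pyGetD_natCast, hcs]
      simp [List.getD_eq_getElem?_getD]
    have hdrop : cs.drop (u.length + 1) = rest := by
      rw [hcs, ← List.drop_drop, List.drop_left]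
      rfl
    by_cases hc : c = '.'
    · subst hc
      rw [hget, if_pos rfl]
      have hsl : PySem.List.slice cs (some ((q : Int) + 1)) none = cs.drop (q + 1) := by
        have h4 : (q : Int) + 1 = ((q + 1 : Nat) : Int) := by push_cast; ring
        rw [h4, PySem.List.slice_from_natCast]
      have hu1 : (u.length : Int) + 1 = (((u ++ ['.']).length : Nat) : Int) := by simp
      rw [hsl, hu1,
        ih cs (u ++ ['.']) (ans ++ [cs.drop (q + 1)]) u.length (by simp [hcs]) (by simp)]
      rw [show cs.drop (u.length + 1) = rest from hdrop]
      simp [dotSufs]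
    · rw [hget, if_neg hc]
      have hu1 : (u.length : Int) + 1 = (((u ++ [c]).length : Nat) : Int) := by simp
      rw [hu1, ih cs (u ++ [c]) ans q (by simp [hcs]) (by simp; omega)]
      simp [dotSufs, hc]

-- first occurrence decomposition
theorem first_dot (v : List Char) : '.' ∈ v → ∃ a b, v = a ++ '.' :: b ∧ '.' ∉ a := by
  induction v with
  | nil => simp
  | cons c rest ih =>
    intro h
    by_cases hc : c = '.'
    · exact ⟨[], rest, by simp [hc], by simp⟩
    · have hmem : '.' ∈ rest := by
        rcases List.mem_cons.mp h with h1 | h1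
        · exact absurd h1.symm hc
        · exact h1
      obtain ⟨a, b, hab, hna⟩ := ih hmem
      refine ⟨c :: a, b, by simp [hab], ?_⟩
      simp only [List.mem_cons, not_or]
      exact ⟨fun h' => hc h'.symm, hna⟩

theorem sp_no_dot (u : List Char) (h : '.' ∉ u) : sp u [] = [u] := by
  have h0 := sp_no_dot_append u [] [] h
  simpa [sp] using h0

theorem sp_split (u v : List Char) (h : '.' ∉ u) : sp (u ++ '.' :: v) [] = u :: sp v [] := by
  rw [sp_no_dot_append u ('.' :: v) [] h]
  simp [sp]

theorem brange_sp : ∀ (n : Nat) (v : List Char), v.length ≤ n → brange (sp v []) = dotSufs v v := by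
  intro n
  induction n with
  | zero =>
    intro v hv
    have hv0 : v = [] := List.length_eq_zero_iff.mp (by omega)
    subst hv0
    simp [sp, brange, dotSufs, PySem.List.pyRange_one_eq_nil]
  | succ n ih =>
    intro v hv
    by_cases hd : '.' ∈ v
    · obtain ⟨a, b, hab, hna⟩ := first_dot v hd
      rw [hab, sp_split a b hna]
      obtain ⟨h, t, ht⟩ := sp_cons b []
      rw [brange_cons a (sp b []) (by rw [ht]; simp)]
      rw [← sp_split a b hna, join_sp]
      rw [ih b (by have hl := congrArg List.length hab; simp at hl; omega)]
      have hskip : dotSufs (a ++ '.' :: b) (a ++ '.' :: b) = dotSufs (a ++ '.' :: b) ('.' :: b) :=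
        dotSufs_skip a _ ('.' :: b) hna
      rw [← hab]
      rw [show dotSufs v v = (a ++ '.' :: b) :: dotSufs b b by
        rw [hab, hskip]; simp [dotSufs]]
      simp [hab]
    · rw [sp_no_dot v hd, dotSufs_no_dot v v hd]
      simp [brange, PySem.List.pyRange_one_eq_nil]

-- from find's minimality: no '.' in the prefix before the first hit
theorem no_dot_take (cs : List Char) (k : Nat)
    (hmin : ∀ i < k, ¬ ['.'] <+: cs.drop i) : '.' ∉ cs.take k := by
  intro hmem
  obtain ⟨i, hi, hget⟩ := List.getElem_of_mem hmem
  have hik : i < k := lt_of_lt_of_le hi (by simp)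
  have hil : i < cs.length := by simp at hi; omega
  apply hmin i hik
  rw [List.drop_eq_getElem_cons hil]
  rw [List.getElem_take] at hget
  rw [hget]
  exact ⟨cs.drop (i + 1), rfl⟩

theorem altB_eq (s : String) (h : PySem.Chars.isIn ['.'] s.toList = true) :
    split_helper_alt s = (brange (sp s.toList [])).map String.ofList := by
  unfold split_helper_alt brange
  rw [if_neg (by simp [h])]
  rw [splitOn_eq_sp]

-- ===== VERDICT (by name: the statement is the Claim_ definition above) =====
theorem split_helper_spec : Claim_equal_split_helper := by
  unfold Claim_equal_split_helper Spec_split_helper Pre_split_helper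
  intro s _ hpre
  have hin : PySem.Chars.isIn ['.'] s.toList = true := by
    simpa [PySem.Str.isIn] using hpre
  have hfind : 0 ≤ PySem.Chars.find s.toList ['.'] := by
    rw [PySem.Chars.find_nonneg_iff]
    exact (PySem.Chars.isIn_iff_infix _ _).mp hin
  obtain ⟨hpref, hmin⟩ := PySem.Chars.find_spec (s := s.toList) (sub := ['.']) hfind
  set k := (PySem.Chars.find s.toList ['.']).toNat with hk
  obtain ⟨v, hv⟩ : ∃ v, s.toList.drop k = '.' :: v := by
    obtain ⟨t, ht⟩ := hpref
    exact ⟨t, by simpa using ht.symm⟩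
  have hklen : k < s.toList.length := by
    by_contra hge
    rw [List.drop_eq_nil_of_le (by omega)] at hv
    simp at hv
  have hsplit : s.toList = s.toList.take k ++ '.' :: v := by
    conv_lhs => rw [← List.take_append_drop k s.toList]
    rw [hv]
  have htk : (s.toList.take k).length = k := by rw [List.length_take]; omega
  have hndot : '.' ∉ s.toList.take k := no_dot_take s.toList k hmin
  -- A side
  unfold split_helper
  rw [show PySem.Chars.findFrom s.toList ['.'] 0 = (k : Int) by
    rw [PySem.Chars.findFrom_zero]; exact (Int.toNat_of_nonneg hfind).symm]
  rw [PySem.Str.len_eq]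
  have hstart : (k : Int) + 1 = (((s.toList.take k ++ ['.']).length : Nat) : Int) := by
    simp [htk]
  rw [hstart,
    loopA v s.toList (s.toList.take k ++ ['.']) [s.toList] k
      (by rw [List.append_assoc]; simpa using hsplit) (by simp [htk])]
  have hdropv : s.toList.drop (k + 1) = v := by
    rw [← List.drop_drop, hv]
    rfl
  rw [hdropv]
  -- B side
  rw [altB_eq s hin]
  conv_rhs => rw [show s.toList = s.toList.take k ++ '.' :: v from hsplit]
  rw [sp_split _ _ hndot]
  obtain ⟨h, t, ht⟩ := sp_cons v []
  rw [brange_cons _ (sp v []) (by rw [ht]; simp)]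
  rw [← sp_split _ _ hndot, join_sp]
  rw [brange_sp v.length v (le_refl _)]
  simp [← hsplit]
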